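-- pv_equiv track=rewrite | github.com/stonewell/pyEverything | src/pyeverything/core/indexer/whoosh/regexp.py | __add_brackets
-- ===== SOURCE A (Python) =====
-- from collections import deque
--
-- def __add_brackets(s):
--   s = s.strip()
--
--   if len(s) == 0:
--     return s
--
--   if s[0] != '(' or s[-1] != ')':
--     return f'({s})'
--
--   v = deque()
--
--   for i, c in enumerate(s):
--     if c == '(':
--       v.append((i, c))
--     elif c == ')':
--       ii, cc = v.popleft()
--
--       if ii == 0 and i != len(s) - 1:
--         return f'({s})'
--
--   return s
-- ===== SOURCE B (Python) =====
-- def __add_brackets(s):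
--   s = s.strip()
--
--   if len(s) == 0:
--     return s
--
--   if s[0] != '(' or s[-1] != ')':
--     return f'({s})'
--
--   # the first closing parenthesis must be the final character for s to count as fully enclosed
--   return s if s.find(')') == len(s) - 1 else f'({s})'
-- ===== Notes on version B (the rewrite author's own statement) =====
-- stated objective: simpler
-- what changed: Replaced the deque-based paren-matching loop by a single find check: the string is kept unchanged iff its first closing parenthesis is its last character, otherwise it is wrapped.
import Mathlib
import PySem

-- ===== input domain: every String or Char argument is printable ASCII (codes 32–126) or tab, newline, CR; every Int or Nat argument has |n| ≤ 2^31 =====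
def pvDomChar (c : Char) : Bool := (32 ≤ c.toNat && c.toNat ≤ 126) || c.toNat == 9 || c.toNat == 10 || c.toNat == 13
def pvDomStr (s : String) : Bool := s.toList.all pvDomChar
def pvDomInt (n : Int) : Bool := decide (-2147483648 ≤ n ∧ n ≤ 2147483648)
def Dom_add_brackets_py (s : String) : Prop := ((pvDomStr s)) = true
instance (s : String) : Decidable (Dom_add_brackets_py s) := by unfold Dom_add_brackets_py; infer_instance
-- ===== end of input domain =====

-- B replaces A's deque loop by a single find check (simpler): the stripped string stays unchanged
-- iff its first closing parenthesis is its last character, otherwise it is wrapped in parentheses.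


-- ===== PORT A =====
-- the for-loop over enumerate(s) with the deque v; result 'none' models the IndexError of
-- v.popleft() on an empty deque (unreachable: the guard guarantees t[0] = '(', so the first ')'
-- always pops the index-0 entry and either returns or ends the loop)
def aLoop (t : List Char) (v : List (Int × Char)) : List (Int × Char) → Option (List Char)
  | [] => some t
  | (i, c) :: rest =>
    if c = '(' then aLoop t (v ++ [(i, c)]) rest
    else if c = ')' then
      match v with
      | [] => none
      | (ii, _) :: v' =>
        if ii = 0 ∧ i ≠ (t.length : Int) - 1 then some ('(' :: t ++ [')'])
        else aLoop t v' rest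
    else aLoop t v rest

def add_brackets_py (s : String) : String :=
  let t := PySem.Chars.strip s.toList
  if t.length = 0 then String.ofList t
  else if PySem.List.pyGet? t 0 ≠ some '(' ∨ PySem.List.pyGet? t (-1) ≠ some ')' then
    String.ofList ('(' :: t ++ [')'])
  else
    -- .getD is never taken: aLoop never returns none here (see comment above)
    String.ofList ((aLoop t [] (PySem.List.enumerate t 0)).getD t)

-- ===== PORT B =====
def add_brackets_py_alt (s : String) : String :=
  let t := PySem.Chars.strip s.toList
  if t.length = 0 then String.ofList t
  else if PySem.List.pyGet? t 0 ≠ some '(' ∨ PySem.List.pyGet? t (-1) ≠ some ')' then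
    String.ofList ('(' :: t ++ [')'])
  else if PySem.Chars.find t [')'] = (t.length : Int) - 1 then String.ofList t
  else String.ofList ('(' :: t ++ [')'])

-- ===== PRECONDITION & SPEC =====
def Spec_add_brackets_py (s : String) (out : String) : Prop := out = add_brackets_py_alt s
instance (s : String) (out : String) : Decidable (Spec_add_brackets_py s out) := by unfold Spec_add_brackets_py; infer_instance

-- ===== CLAIM (what is proved, stated in full; the proofs are below) =====
def Claim_equal_add_brackets_py : Prop := ∀ (s : String), Dom_add_brackets_py s → Spec_add_brackets_py s (add_brackets_py s)

-- ===== LEMMAS AND PROOFS =====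

theorem singleton_prefix_iff (c : Char) (l : List Char) :
    [c] <+: l ↔ l[0]? = some c := by
  cases l with
  | nil => simp
  | cons x xs =>
    constructor
    · rintro ⟨t, ht⟩; simp_all
    · intro h; simp at h; exact ⟨xs, by simp [h]⟩

-- Chars.find of a single-character needle is its first index
theorem find_singleton_eq_index (t : List Char) (c : Char) (m : Nat)
    (h : PySem.List.index? t c = some m) : PySem.Chars.find t [c] = (m : Int) := by
  obtain ⟨hm, hget, hmin⟩ := PySem.List.getElem_of_index?_eq_some h
  have hpre : [c] <+: t.drop m := by
    rw [singleton_prefix_iff]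
    simp [hm, hget]
  have hne : PySem.Chars.find t [c] ≠ -1 := by
    rw [PySem.Chars.find_ne_neg_one_iff]
    exact hpre.isInfix.trans (List.drop_suffix _ _).isInfix
  have hnn : 0 ≤ PySem.Chars.find t [c] := by
    have := PySem.Chars.neg_one_le_find (s := t) (sub := [c]); omega
  obtain ⟨hfpre, hfmin⟩ := PySem.Chars.find_spec (s := t) (sub := [c]) hnn
  have hle := PySem.Chars.find_le_length (s := t) (sub := [c])
  set f := PySem.Chars.find t [c] with hf
  have h1 : ¬ f.toNat < m := by
    intro hlt
    rw [singleton_prefix_iff] at hfpre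
    have hflen : f.toNat < t.length := by omega
    simp [hflen] at hfpre
    exact hmin _ hlt hfpre
  have h2 : ¬ m < f.toNat := by
    intro hlt
    exact hfmin m hlt hpre
  omega

-- the invariant loop characterisation: with the index-0 '(' at the front of the deque,
-- the loop's outcome is decided by the first ')' of the remaining suffix u
theorem aLoop_char (t : List Char) (u : List Char) (k : Int) (w : List (Int × Char))
    (hk : 1 ≤ k) (hlen : k + u.length = t.length) :
    aLoop t ((0, '(') :: w) (PySem.List.enumerate u k) =
      match PySem.List.index? u ')' with
      | none => some t
      | some p => if k + p = (t.length : Int) - 1 then some t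
                  else some ('(' :: t ++ [')']) := by
  induction u generalizing k w with
  | nil => simp [PySem.List.enumerate_nil, aLoop, PySem.List.index?]
  | cons c u' ih =>
    rw [PySem.List.enumerate_cons]
    have hlen' : k + 1 + (u'.length : Int) = t.length := by
      simp only [List.length_cons] at hlen; push_cast at hlen ⊢; omega
    by_cases hc : c = '('
    · subst hc
      rw [PySem.List.index?_cons_of_ne (x := '(') (v := ')') u' (by decide)]
      have hrec := ih (k + 1) (w ++ [(k, '(')]) (by omega) hlen'
      have hstep : aLoop t ((0, '(') :: w) (((k : Int), '(') :: PySem.List.enumerate u' (k + 1)) =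
          aLoop t ((0, '(') :: (w ++ [(k, '(')])) (PySem.List.enumerate u' (k + 1)) := by
        simp [aLoop]
      cases hpi : PySem.List.index? u' ')' with
      | none =>
          rw [hpi] at hrec
          show aLoop t ((0, '(') :: w) (((k : Int), '(') :: PySem.List.enumerate u' (k + 1)) = some t
          rw [hstep, hrec]
      | some p =>
          rw [hpi] at hrec
          have hcond : (k + 1 + (p : Int) = (t.length : Int) - 1) ↔
              (k + ((p + 1 : Nat) : Int) = (t.length : Int) - 1) := by push_cast; omega
          show aLoop t ((0, '(') :: w) (((k : Int), '(') :: PySem.List.enumerate u' (k + 1)) =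
            if k + ((p + 1 : Nat) : Int) = (t.length : Int) - 1 then some t
            else some ('(' :: t ++ [')'])
          rw [hstep, hrec]
          exact if_congr hcond rfl rfl
    · by_cases hcr : c = ')'
      · subst hcr
        rw [PySem.List.index?_cons_self ')' u']
        by_cases hlast : k = (t.length : Int) - 1
        · have hu' : u' = [] := by
            have h0 : (u'.length : Int) = 0 := by omega
            simpa using h0
          subst hu'
          simp [aLoop, hlast, PySem.List.enumerate_nil]
        · simp [aLoop, hlast]
      · rw [PySem.List.index?_cons_of_ne (x := c) (v := ')') u' hcr]
        have hrec := ih (k + 1) w (by omega) hlen'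
        have hstep : aLoop t ((0, '(') :: w) (((k : Int), c) :: PySem.List.enumerate u' (k + 1)) =
            aLoop t ((0, '(') :: w) (PySem.List.enumerate u' (k + 1)) := by
          simp [aLoop, hc, hcr]
        cases hpi : PySem.List.index? u' ')' with
        | none =>
            rw [hpi] at hrec
            show aLoop t ((0, '(') :: w) (((k : Int), c) :: PySem.List.enumerate u' (k + 1)) = some t
            rw [hstep, hrec]
        | some p =>
            rw [hpi] at hrec
            have hcond : (k + 1 + (p : Int) = (t.length : Int) - 1) ↔
                (k + ((p + 1 : Nat) : Int) = (t.length : Int) - 1) := by push_cast; omega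
            show aLoop t ((0, '(') :: w) (((k : Int), c) :: PySem.List.enumerate u' (k + 1)) =
              if k + ((p + 1 : Nat) : Int) = (t.length : Int) - 1 then some t
              else some ('(' :: t ++ [')'])
            rw [hstep, hrec]
            exact if_congr hcond rfl rfl

-- ===== VERDICT (by name: the statement is the Claim_ definition above) =====
theorem add_brackets_py_spec : Claim_equal_add_brackets_py := by
  intro s _
  unfold Spec_add_brackets_py add_brackets_py add_brackets_py_alt
  set t := PySem.Chars.strip s.toList with ht
  by_cases h0 : t.length = 0
  · simp [h0]
  · simp only [if_neg h0]
    by_cases hg : PySem.List.pyGet? t 0 ≠ some '(' ∨ PySem.List.pyGet? t (-1) ≠ some ')'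
    · simp [hg]
    · simp only [if_neg hg]
      push_neg at hg
      obtain ⟨hg0, hg1⟩ := hg
      obtain ⟨c0, u, hcu⟩ : ∃ c0 u, t = c0 :: u :=
        List.exists_cons_of_ne_nil (by intro hnil; rw [hnil] at h0; simp at h0)
      have hc0 : c0 = '(' := by
        rw [hcu, PySem.List.pyGet?_zero_cons] at hg0
        exact Option.some.inj hg0
      subst hc0
      have hlastt : t.getLast? = some ')' := by
        rw [PySem.List.pyGet?_neg_one] at hg1; exact hg1
      have hune : u ≠ [] := by
        intro hnil
        rw [hcu, hnil] at hlastt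
        simp at hlastt
      have humem : (')' : Char) ∈ u := by
        have hul : u.getLast? = some ')' := by
          obtain ⟨b, u2, hbu⟩ := List.exists_cons_of_ne_nil hune
          rw [hcu, hbu, List.getLast?_cons_cons] at hlastt
          rw [hbu]
          exact hlastt
        exact List.mem_of_getLast? hul
      obtain ⟨p, hp⟩ : ∃ p, PySem.List.index? u ')' = some p := by
        have hiff := PySem.List.index?_isSome_iff u (')' : Char)
        rcases hidx : PySem.List.index? u ')' with _ | p
        · rw [hidx] at hiff; simp [humem] at hiff
        · exact ⟨p, rfl⟩
      have hA : aLoop t [] (PySem.List.enumerate t 0) =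
          (if (1 : Int) + p = (t.length : Int) - 1 then some t
           else some ('(' :: t ++ [')'])) := by
        rw [hcu, PySem.List.enumerate_cons]
        have hchar := aLoop_char t u 1 [] (by omega)
          (by rw [hcu]; push_cast; simp; omega)
        rw [hp] at hchar
        rw [← hcu]
        simpa [aLoop] using hchar
      have hidxt : PySem.List.index? t ')' = some (p + 1) := by
        rw [hcu, PySem.List.index?_cons_of_ne (x := '(') (v := ')') u (by decide), hp]
        rfl
      have hB : PySem.Chars.find t [')'] = ((p + 1 : Nat) : Int) :=
        find_singleton_eq_index t ')' (p + 1) hidxt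
      obtain ⟨hlt, -, -⟩ := PySem.List.getElem_of_index?_eq_some hidxt
      rw [hA, hB]
      by_cases hcase : (1 : Int) + p = (t.length : Int) - 1
      · rw [if_pos hcase, Option.getD_some,
          if_pos (show ((p + 1 : Nat) : Int) = (t.length : Int) - 1 by push_cast at hcase ⊢; omega)]
      · rw [if_neg hcase, Option.getD_some,
          if_neg (show ¬ ((p + 1 : Nat) : Int) = (t.length : Int) - 1 by push_cast at hcase ⊢; omega)]
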